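-- pv_equiv track=rewrite | github.com/miliar/Code_Jam_Webscraper | solutions_python/Problem_155/2884.py | process_case
-- ===== SOURCE A (Python) =====
-- def process_case(level, counts):
--
--     extra = 0
--     total = 0
--
--     for level, count in enumerate(counts):
--         if count and (total + extra) < level:
--             extra += level - (total + extra)
--         total += count
--
--     return extra
-- ===== SOURCE B (Python) =====
-- def process_case(level, counts):
--     # Build a prefix-sum table first, then compute the answer as a single max
--     # over the shortfalls i - prefix[i] at nonzero-count indices.
--     prefix = [0]
--     run = 0
--     for c in counts:
--         run += c
--         prefix.append(run)
--     return max([0] + [i - p for i, (c, p) in enumerate(zip(counts, prefix)) if c])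
-- ===== Notes on version B (the rewrite author's own statement) =====
-- stated objective: alternative
-- what changed: Replaces the stateful conditional-update loop (extra patched in place while total accumulates) by a two-phase computation: build a prefix-sum table, then take the max of 0 and the shortfalls i - prefix[i] over indices with nonzero count.
import Mathlib
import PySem

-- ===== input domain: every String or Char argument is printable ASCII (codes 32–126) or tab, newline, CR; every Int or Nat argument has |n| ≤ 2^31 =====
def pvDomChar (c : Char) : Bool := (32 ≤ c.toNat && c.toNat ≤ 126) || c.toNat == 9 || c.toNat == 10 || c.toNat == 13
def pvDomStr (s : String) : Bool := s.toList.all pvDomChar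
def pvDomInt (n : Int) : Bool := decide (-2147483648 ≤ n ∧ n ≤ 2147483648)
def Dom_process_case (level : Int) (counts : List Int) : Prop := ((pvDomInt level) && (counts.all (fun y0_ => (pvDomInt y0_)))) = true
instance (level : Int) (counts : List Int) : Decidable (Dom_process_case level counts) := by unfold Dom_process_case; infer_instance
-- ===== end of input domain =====

-- B replaces A's stateful conditional-update loop by a prefix-sum table plus a single max
-- over shortfalls at nonzero-count indices (objective: alternative decomposition, same cost).


-- ===== PORT A =====
-- the loop: for level, count in enumerate(counts): if count and (total+extra) < level: extra += level-(total+extra); total += count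
def process_case (level : Int) (counts : List Int) : Int :=
  ((PySem.List.enumerate counts 0).foldl
    (fun (s : Int × Int) (p : Int × Int) =>
      let extra := if p.2 ≠ 0 ∧ s.2 + s.1 < p.1 then s.1 + (p.1 - (s.2 + s.1)) else s.1
      (extra, s.2 + p.2)) ((0 : Int), (0 : Int))).1

-- ===== PORT B =====
def process_case_alt (level : Int) (counts : List Int) : Int :=
  -- prefix = [0]; run = 0; for c in counts: run += c; prefix.append(run)
  let st := counts.foldl (fun (s : List Int × Int) (c : Int) => (s.1 ++ [s.2 + c], s.2 + c)) (([0] : List Int), (0 : Int))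
  -- max([0] + [i - p for i, (c, p) in enumerate(zip(counts, prefix)) if c])  (max(xs) is the running-max loop)
  let items := (PySem.List.enumerate (counts.zip st.1) 0).filterMap
      (fun q => if q.2.1 ≠ 0 then some (q.1 - q.2.2) else none)
  items.foldl max 0

-- ===== PRECONDITION & SPEC =====
def Spec_process_case (level : Int) (counts : List Int) (out : Int) : Prop := out = process_case_alt level counts
instance (level : Int) (counts : List Int) (out : Int) : Decidable (Spec_process_case level counts out) := by unfold Spec_process_case; infer_instance

-- ===== CLAIM (what is proved, stated in full; the proofs are below) =====
def Claim_equal_process_case : Prop := ∀ (level : Int) (counts : List Int), Dom_process_case level counts → Spec_process_case level counts (process_case level counts)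

-- ===== LEMMAS AND PROOFS =====

-- reference list of shortfalls i - t at nonzero-count positions
def pvItems : List Int → Int → Int → List Int
  | [], _, _ => []
  | c :: cs, i, t => (if c ≠ 0 then [i - t] else []) ++ pvItems cs (i + 1) (t + c)

-- reference prefix-sum tail: scan t cs = [t+c1, t+c1+c2, …]
def pvScan : Int → List Int → List Int
  | _, [] => []
  | t, c :: cs => (t + c) :: pvScan (t + c) cs

lemma pvA_fold (cs : List Int) : ∀ (i t e : Int),
    ((PySem.List.enumerate cs i).foldl
      (fun (s : Int × Int) (p : Int × Int) =>
        let extra := if p.2 ≠ 0 ∧ s.2 + s.1 < p.1 then s.1 + (p.1 - (s.2 + s.1)) else s.1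
        (extra, s.2 + p.2)) (e, t)).1
    = (pvItems cs i t).foldl max e := by
  induction cs with
  | nil => intro i t e; simp [PySem.List.enumerate_nil, pvItems]
  | cons c cs ih =>
    intro i t e
    rw [PySem.List.enumerate_cons]
    simp only [List.foldl_cons, pvItems]
    by_cases hc : c ≠ 0
    · rw [ih, if_pos hc, List.foldl_append]
      simp only [List.foldl_cons, List.foldl_nil]
      congr 1
      split_ifs with h
      · rcases h with ⟨_, hlt⟩; omega
      · have : ¬ (t + e < i) := fun hlt => h ⟨hc, hlt⟩
        omega
    · rw [ih, if_neg hc]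
      simp only [hc, false_and, if_false, List.nil_append]

lemma pvB_prefix (cs : List Int) : ∀ (l : List Int) (t : Int),
    cs.foldl (fun (s : List Int × Int) (c : Int) => (s.1 ++ [s.2 + c], s.2 + c)) (l, t)
    = (l ++ pvScan t cs, t + cs.sum) := by
  induction cs with
  | nil => intro l t; simp [pvScan]
  | cons c cs ih =>
    intro l t
    simp only [List.foldl_cons, pvScan]
    rw [ih]
    simp [List.append_assoc, List.sum_cons, Prod.ext_iff, add_assoc]

lemma pvB_items (cs : List Int) : ∀ (i t : Int),
    (PySem.List.enumerate (cs.zip (t :: pvScan t cs)) i).filterMap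
      (fun q => if q.2.1 ≠ 0 then some (q.1 - q.2.2) else none)
    = pvItems cs i t := by
  induction cs with
  | nil => intro i t; simp [PySem.List.enumerate_nil, pvItems]
  | cons c cs ih =>
    intro i t
    simp only [pvScan, List.zip_cons_cons, PySem.List.enumerate_cons, List.filterMap_cons,
      pvItems]
    by_cases hc : c ≠ 0
    · rw [if_pos hc, if_pos hc, ih]
      rfl
    · rw [if_neg hc, if_neg hc, ih]
      rfl

-- ===== VERDICT (by name: the statement is the Claim_ definition above) =====
theorem process_case_spec : Claim_equal_process_case := by
  intro level counts _
  simp only [Spec_process_case, process_case, process_case_alt]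
  rw [pvA_fold, pvB_prefix]
  have h : ([0] : List Int) ++ pvScan 0 counts = (0 : Int) :: pvScan 0 counts := by simp
  rw [h, pvB_items]
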